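-- pv_equiv track=rewrite | github.com/paiml/reprorusted-python-cli | examples/example_percent_encode/urlencode_cli.py | is_encoded
-- ===== SOURCE A (Python) =====
-- def is_encoded(text: str) -> bool:
--     """Check if text contains percent-encoding."""
--     i = 0
--     while i < len(text):
--         if text[i] == "%":
--             if i + 2 < len(text):
--                 try:
--                     int(text[i + 1 : i + 3], 16)
--                     return True
--                 except ValueError:
--                     pass
--         i += 1
--     return False
-- ===== SOURCE B (Python) =====
-- def is_encoded(text: str) -> bool:
--     """Check if text contains percent-encoding."""
--     for seg in text.split('%')[1:]:
--         if len(seg) >= 2: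
--             try:
--                 int(seg[:2], 16)
--                 return True
--             except ValueError:
--                 pass
--     return False
-- ===== Notes on version B (the rewrite author's own statement) =====
-- stated objective: faster
-- what changed: B replaces A's per-index while loop, which tests int(text[i+1:i+3],16) at every percent sign it walks to character by character, with a single str.split on the percent sign followed by a scan over the segments after the first, testing int(seg[:2],16) only when the segment has at least two characters.
import Mathlib
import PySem

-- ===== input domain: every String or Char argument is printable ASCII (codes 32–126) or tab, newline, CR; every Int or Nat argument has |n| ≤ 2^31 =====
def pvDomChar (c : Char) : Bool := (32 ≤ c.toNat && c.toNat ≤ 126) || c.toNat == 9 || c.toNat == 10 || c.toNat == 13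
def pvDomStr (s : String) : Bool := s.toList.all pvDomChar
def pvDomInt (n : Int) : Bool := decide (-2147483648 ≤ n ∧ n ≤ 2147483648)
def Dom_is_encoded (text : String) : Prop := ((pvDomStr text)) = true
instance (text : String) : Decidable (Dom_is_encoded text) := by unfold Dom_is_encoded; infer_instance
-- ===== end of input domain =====

-- B splits the text on the percent sign once and tests the two-char head of each following
-- segment, instead of A's per-index while loop; same exact int(...,16) acceptance (measured faster).

-- ===== PORT A =====
-- while loop over index i; text[i+1:i+3] is the slice, int(...,16) is PySem.Int.ofCharsBase?
def isEncLoop (cs : List Char) (i : Nat) : Bool :=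
  if h : i < cs.length then
    if cs[i] = '%' then
      if i + 2 < cs.length then
        match PySem.Int.ofCharsBase? (PySem.Chars.slice cs (some ((i : Int) + 1)) (some ((i : Int) + 3))) 16 with
        | some _ => true
        | none => isEncLoop cs (i + 1)
      else isEncLoop cs (i + 1)
    else isEncLoop cs (i + 1)
  else false
termination_by cs.length - i

def is_encoded (text : String) : Bool := isEncLoop text.toList 0

-- ===== PORT B =====
-- for seg in text.split('%')[1:]: if len(seg) >= 2 and int(seg[:2],16) parses, True
def isEncSegs : List (List Char) → Bool
  | [] => false
  | seg :: rest =>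
    if 2 ≤ seg.length then
      match PySem.Int.ofCharsBase? (PySem.Chars.slice seg none (some 2)) 16 with
      | some _ => true
      | none => isEncSegs rest
    else isEncSegs rest

def is_encoded_alt (text : String) : Bool :=
  isEncSegs ((PySem.Chars.splitOn text.toList ['%']).drop 1)

-- ===== PRECONDITION & SPEC =====
def Spec_is_encoded (text : String) (out : Bool) : Prop := out = is_encoded_alt text
instance (text : String) (out : Bool) : Decidable (Spec_is_encoded text out) := by unfold Spec_is_encoded; infer_instance

-- ===== CLAIM (what is proved, stated in full; the proofs are below) =====
def Claim_equal_is_encoded : Prop := ∀ (text : String), Dom_is_encoded text → Spec_is_encoded text (is_encoded text)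

-- ===== LEMMAS AND PROOFS =====

-- the two-char window text[i+1:i+3] as drop/take
lemma window_eq (cs : List Char) (i : Nat) :
    PySem.Chars.slice cs (some ((i : Int) + 1)) (some ((i : Int) + 3)) = (cs.drop (i + 1)).take 2 := by
  have h1 : ((i : Int) + 1) = ((i + 1 : Nat) : Int) := by push_cast; ring
  have h3 : ((i : Int) + 3) = ((i + 3 : Nat) : Int) := by push_cast; ring
  rw [PySem.Chars.slice_eq_listSlice, h1, h3, PySem.List.slice_natCast]
  congr 1
  omega

-- seg[:2] as take
lemma head2_eq (seg : List Char) :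
    PySem.Chars.slice seg none (some 2) = seg.take 2 := by
  rw [PySem.Chars.slice_eq_listSlice, PySem.List.slice_to seg (by norm_num)]
  rfl

lemma isEncLoop_shift (c : Char) : ∀ (n : Nat) (cs : List Char) (i : Nat), cs.length ≤ i + n →
    isEncLoop (c :: cs) (i + 1) = isEncLoop cs i := by
  intro n
  induction n with
  | zero =>
    intro cs i h
    have h1 : ¬ i + 1 < (c :: cs).length := by simp; omega
    have h2 : ¬ i < cs.length := by omega
    conv_lhs => rw [isEncLoop]
    conv_rhs => rw [isEncLoop]
    simp [h2]
  | succ n ih =>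
    intro cs i h
    conv_lhs => rw [isEncLoop]
    conv_rhs => rw [isEncLoop]
    by_cases hi : i < cs.length
    · have hi' : i + 1 < (c :: cs).length := by simp; omega
      rw [dif_pos hi', dif_pos hi]
      have hg : (c :: cs)[i + 1] = cs[i] := by simp
      rw [hg]
      by_cases hp : cs[i] = '%'
      · rw [if_pos hp, if_pos hp]
        have hlen : (i + 1 + 2 < (c :: cs).length) ↔ (i + 2 < cs.length) := by simp; omega
        by_cases h2 : i + 2 < cs.length
        · rw [if_pos (hlen.mpr h2), if_pos h2]
          rw [window_eq, window_eq]
          have hw : ((c :: cs).drop (i + 1 + 1)).take 2 = (cs.drop (i + 1)).take 2 := by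
            simp
          rw [hw]
          have hrec : isEncLoop (c :: cs) (i + 1 + 1) = isEncLoop cs (i + 1) := ih cs (i + 1) (by omega)
          cases PySem.Int.ofCharsBase? ((cs.drop (i + 1)).take 2) 16 <;> simp [hrec]
        · rw [if_neg (fun hx => h2 (hlen.mp hx)), if_neg h2]
          exact ih cs (i + 1) (by omega)
      · rw [if_neg hp, if_neg hp]
        exact ih cs (i + 1) (by omega)
    · have hi' : ¬ i + 1 < (c :: cs).length := by simp; omega
      simp [hi]

lemma isEncLoop_skip : ∀ (h rest : List Char), '%' ∉ h →
    isEncLoop (h ++ rest) 0 = isEncLoop rest 0 := by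
  intro h
  induction h with
  | nil => simp
  | cons c h' ih =>
    intro rest hnp
    have hc : c ≠ '%' := by simp at hnp; exact fun hx => hnp.1 hx.symm
    rw [isEncLoop]
    have h0 : 0 < ((c :: h') ++ rest).length := by simp
    rw [dif_pos h0]
    have hg : ((c :: h') ++ rest)[0] = c := by simp
    rw [hg, if_neg hc]
    have := isEncLoop_shift c (h' ++ rest).length (h' ++ rest) 0 (by omega)
    rw [show (0 + 1 : Nat) = 1 from rfl] at this
    calc isEncLoop (c :: (h' ++ rest)) 1 = isEncLoop (h' ++ rest) 0 := this
      _ = isEncLoop rest 0 := ih rest (by simp at hnp; exact hnp.2)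

lemma isEncLoop_noPct (cs : List Char) (h : '%' ∉ cs) : isEncLoop cs 0 = false := by
  have := isEncLoop_skip cs [] h
  simp at this
  rw [this, isEncLoop]
  simp

-- the left-fold split as a structural recursion
def mySplit : List Char → List (List Char)
  | [] => [[]]
  | c :: t =>
    if c = '%' then [] :: mySplit t
    else
      match mySplit t with
      | [] => [[c]]
      | h :: r => (c :: h) :: r

lemma mySplit_ne_nil (cs : List Char) : mySplit cs ≠ [] := by
  induction cs with
  | nil => simp [mySplit]
  | cons c t ih =>
    simp only [mySplit]
    split
    · simp
    · split <;> simp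

lemma go_eq : ∀ (fuel : Nat) (l cur acc : _), l.length < fuel →
    PySem.Chars.splitOn.go ['%'] fuel l cur acc =
      acc.reverse ++ (match mySplit l with
                      | [] => [cur.reverse]
                      | h :: r => (cur.reverse ++ h) :: r) := by
  intro fuel
  induction fuel with
  | zero => intro l cur acc h; omega
  | succ fuel ih =>
    intro l cur acc h
    cases l with
    | nil => simp [PySem.Chars.splitOn.go, mySplit]
    | cons c rest =>
      rw [PySem.Chars.splitOn.go]
      by_cases hc : c = '%'
      · subst hc
        have hpre : ['%'].isPrefixOf ('%' :: rest) = true := by simp [List.isPrefixOf]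
        rw [if_pos hpre]
        rw [ih _ _ _ (by simp at h ⊢; omega)]
        obtain ⟨hh, hr, hsr⟩ : ∃ hh hr, mySplit rest = hh :: hr :=
          List.exists_cons_of_ne_nil (mySplit_ne_nil rest)
        simp [mySplit, hsr]
      · have hpre : ['%'].isPrefixOf (c :: rest) = false := by
          simp [List.isPrefixOf]; exact fun hcontra => hc hcontra.symm
        rw [if_neg (by simp [hpre])]
        rw [ih _ _ _ (by simp at h ⊢; omega)]
        obtain ⟨hh, hr, hsr⟩ : ∃ hh hr, mySplit rest = hh :: hr :=
          List.exists_cons_of_ne_nil (mySplit_ne_nil rest)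
        simp [mySplit, hc, hsr]

lemma splitOn_eq_mySplit (cs : List Char) : PySem.Chars.splitOn cs ['%'] = mySplit cs := by
  unfold PySem.Chars.splitOn
  rw [go_eq _ _ _ _ (by omega)]
  obtain ⟨hh, hr, hsr⟩ : ∃ hh hr, mySplit cs = hh :: hr :=
    List.exists_cons_of_ne_nil (mySplit_ne_nil cs)
  simp [hsr]

lemma mySplit_cases (cs : List Char) :
    (mySplit cs = [cs] ∧ '%' ∉ cs) ∨
    (∃ h t, cs = h ++ '%' :: t ∧ '%' ∉ h ∧ mySplit cs = h :: mySplit t) := by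
  induction cs with
  | nil => left; simp [mySplit]
  | cons c t ih =>
    by_cases hc : c = '%'
    · right
      exact ⟨[], t, by simp [hc], by simp, by simp [mySplit, hc]⟩
    · rcases ih with ⟨h1, h2⟩ | ⟨h, t', h1, h2, h3⟩
      · left
        constructor
        · simp [mySplit, hc, h1]
        · simp [h2]; exact fun hcontra => hc hcontra.symm
      · right
        refine ⟨c :: h, t', by simp [h1], by simp [h2]; exact fun hcontra => hc hcontra.symm, ?_⟩
        simp [mySplit, hc, h3]

-- int('%x', 16) fails for every domain char x
lemma parse_pct_left (b : Char) (hb : pvDomChar b = true) :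
    PySem.Int.ofCharsBase? ['%', b] 16 = none := by
  have hofn : b = Char.ofNat b.toNat := (Char.ofNat_toNat b).symm
  rw [hofn]
  simp only [pvDomChar, Bool.or_eq_true, Bool.and_eq_true, decide_eq_true_eq, beq_iff_eq] at hb
  generalize hg : b.toNat = n at hb ⊢
  rcases hb with (((⟨h1, h2⟩ | h) | h) | h)
  · interval_cases n <;> decide
  · subst h; decide
  · subst h; decide
  · subst h; decide

-- int('x%', 16) fails for every domain char x
lemma parse_pct_right (a : Char) (ha : pvDomChar a = true) :
    PySem.Int.ofCharsBase? [a, '%'] 16 = none := by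
  have hofn : a = Char.ofNat a.toNat := (Char.ofNat_toNat a).symm
  rw [hofn]
  simp only [pvDomChar, Bool.or_eq_true, Bool.and_eq_true, decide_eq_true_eq, beq_iff_eq] at ha
  generalize hg : a.toNat = n at ha ⊢
  rcases ha with (((⟨h1, h2⟩ | h) | h) | h)
  · interval_cases n <;> decide
  · subst h; decide
  · subst h; decide
  · subst h; decide

lemma main_eq : ∀ (n : Nat) (cs : List Char), cs.length ≤ n → (∀ c ∈ cs, pvDomChar c = true) →
    isEncLoop cs 0 = isEncSegs ((mySplit cs).drop 1) := by
  intro n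
  induction n with
  | zero =>
    intro cs hlen _
    have hnil : cs = [] := List.eq_nil_of_length_eq_zero (by omega)
    subst hnil
    rw [isEncLoop]
    simp [mySplit, isEncSegs]
  | succ n ih =>
    intro cs hlen hdom
    rcases mySplit_cases cs with ⟨hs, hnp⟩ | ⟨h, t, hcs, hnp, hs⟩
    · rw [hs, isEncLoop_noPct cs hnp]
      simp [isEncSegs]
    · subst hcs
      rw [hs]
      simp only [List.drop_succ_cons, List.drop_zero]
      rw [isEncLoop_skip h ('%' :: t) hnp]
      have hlent : t.length ≤ n := by simp [List.length_append] at hlen; omega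
      have hdomt : ∀ c ∈ t, pvDomChar c = true := fun c hc => hdom c (by simp [hc])
      have hIH : isEncLoop t 0 = isEncSegs ((mySplit t).drop 1) := ih t hlent hdomt
      have hshift : isEncLoop ('%' :: t) 1 = isEncLoop t 0 :=
        isEncLoop_shift '%' t.length t 0 (by omega)
      conv_lhs => rw [isEncLoop]
      have h0 : 0 < ('%' :: t).length := by simp
      rw [dif_pos h0]
      rw [show ('%' :: t)[0] = '%' from rfl, if_pos rfl, window_eq]
      simp only [List.drop_succ_cons, List.drop_zero]
      by_cases h2 : 0 + 2 < ('%' :: t).length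
      · rw [if_pos h2]
        have h2' : 2 ≤ t.length := by simp at h2; omega
        rcases mySplit_cases t with ⟨ht1, ht2⟩ | ⟨h', t'', ht, hnp', hsplit⟩
        · rw [ht1]
          simp only [isEncSegs, if_pos h2', head2_eq]
          cases hp : PySem.Int.ofCharsBase? (t.take 2) 16 with
          | some v => simp
          | none =>
            rw [show (0 + 1 : Nat) = 1 from rfl, hshift, isEncLoop_noPct t ht2]
        · rw [hsplit]
          rw [hsplit] at hIH
          simp only [List.drop_succ_cons, List.drop_zero] at hIH
          by_cases hh : 2 ≤ h'.length
          · have hw : t.take 2 = h'.take 2 := by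
              rw [ht, List.take_append_of_le_length hh]
            rw [hw]
            simp only [isEncSegs, if_pos hh, head2_eq]
            cases hp : PySem.Int.ofCharsBase? (h'.take 2) 16 with
            | some v => simp
            | none =>
              rw [show (0 + 1 : Nat) = 1 from rfl, hshift, hIH]
          · have hwnone : PySem.Int.ofCharsBase? (t.take 2) 16 = none := by
              interval_cases hl : h'.length
              · -- h' = []
                have he : h' = [] := List.eq_nil_of_length_eq_zero hl
                subst he
                simp only [List.nil_append] at ht
                subst ht
                cases t'' with
                | nil => simp at h2'
                | cons b rest =>
                  simp only [List.take_succ_cons, List.take_zero]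
                  exact parse_pct_left b (hdomt b (by simp))
              · -- h'.length = 1
                obtain ⟨a, ha⟩ : ∃ a, h' = [a] := by
                  cases h' with
                  | nil => simp at hl
                  | cons a r => cases r with
                    | nil => exact ⟨a, rfl⟩
                    | cons _ _ => simp at hl
                subst ha
                subst ht
                simp only [List.cons_append, List.nil_append, List.take_succ_cons, List.take_zero]
                exact parse_pct_right a (hdomt a (by simp))
            rw [hwnone]
            simp only [isEncSegs, if_neg hh]
            rw [show (0 + 1 : Nat) = 1 from rfl, hshift, hIH]
      · rw [if_neg h2]
        rw [show (0 + 1 : Nat) = 1 from rfl, hshift, hIH]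
        have h2' : t.length < 2 := by simp at h2; omega
        rcases mySplit_cases t with ⟨ht1, ht2⟩ | ⟨h', t'', ht, hnp', hsplit⟩
        · rw [ht1]
          simp [isEncSegs, Nat.not_le.mpr h2']
        · rw [hsplit]
          have hh : ¬ 2 ≤ h'.length := by
            have : h'.length ≤ t.length := by rw [ht]; simp
            omega
          simp [isEncSegs, hh]

-- ===== VERDICT (by name: the statement is the Claim_ definition above) =====
theorem is_encoded_spec : Claim_equal_is_encoded := by
  intro text hdom
  unfold Spec_is_encoded is_encoded is_encoded_alt
  rw [splitOn_eq_mySplit]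
  apply main_eq text.toList.length _ le_rfl
  intro c hc
  exact List.all_eq_true.mp hdom c hc
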